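-- pv_equiv track=rewrite | github.com/Binaryassets880/ContestTool | app/queries/blocks.py | assign_blocks_to_matches
-- ===== SOURCE A (Python) =====
-- def assign_blocks_to_matches(match_ids: list[str]) -> dict[str, int]:
--     """Assign block numbers to matches - cycles every 30 games.
--
--     Pattern repeats forever:
--     - Games 0-9: Block 1 (8PM)
--     - Games 10-19: Block 2 (4AM)
--     - Games 20-29: Block 3 (12PM)
--     - Games 30-39: Block 1 (8PM)
--     - etc.
--     """
--     if not match_ids:
--         return {}
--
--     sorted_ids = sorted(match_ids)
--
--     result = {}
--     for i, mid in enumerate(sorted_ids):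
--         position_in_cycle = i % 30
--         if position_in_cycle < 10:
--             result[mid] = 1  # 8PM
--         elif position_in_cycle < 20:
--             result[mid] = 2  # 4AM
--         else:
--             result[mid] = 3  # 12PM
--
--     return result
-- ===== SOURCE B (Python) =====
-- def assign_blocks_to_matches(match_ids: list[str]) -> dict[str, int]:
--     """Assign block numbers to matches - cycles every 30 games (chunked pass)."""
--     if not match_ids:
--         return {}
--
--     sorted_ids = sorted(match_ids)
--
--     result = {}
--     for start in range(0, len(sorted_ids), 10):
--         b = (start // 10) % 3 + 1
--         for mid in sorted_ids[start:start + 10]: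
--             result[mid] = b
--     return result
-- ===== Notes on version B (the rewrite author's own statement) =====
-- stated objective: alternative
-- what changed: Replaces the flat enumerate loop with per-element i % 30 branching by a nested pass over 10-element chunks, computing each chunk's block once as (start // 10) % 3 + 1.
import Mathlib
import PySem

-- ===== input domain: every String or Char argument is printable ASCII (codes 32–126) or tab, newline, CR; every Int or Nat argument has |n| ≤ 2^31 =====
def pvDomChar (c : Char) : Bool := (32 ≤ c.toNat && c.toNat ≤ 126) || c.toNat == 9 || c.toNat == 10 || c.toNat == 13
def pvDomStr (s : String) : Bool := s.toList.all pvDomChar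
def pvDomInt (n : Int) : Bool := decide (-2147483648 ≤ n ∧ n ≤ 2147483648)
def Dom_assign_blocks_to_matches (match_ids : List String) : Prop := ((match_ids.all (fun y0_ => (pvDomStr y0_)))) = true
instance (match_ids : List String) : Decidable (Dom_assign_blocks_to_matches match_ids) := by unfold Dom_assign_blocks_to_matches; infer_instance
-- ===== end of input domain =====

-- B replaces A's flat enumerate loop (per-element i % 30 branching) by a nested pass over
-- 10-element chunks whose block is computed once per chunk; same cost, different decomposition.

-- ===== PORT A =====
def assign_blocks_to_matches (match_ids : List String) : List (String × Int) :=
  if match_ids = [] then []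
  else
    let sorted_ids := PySem.List.sorted match_ids (fun x => x) false
    ((PySem.List.enumerate sorted_ids 0).foldl
      (fun (result : PySem.Dict String Int) (p : Int × String) =>
        let position_in_cycle := PySem.Int.mod p.1 30
        if position_in_cycle < 10 then PySem.Dict.insert result p.2 1
        else if position_in_cycle < 20 then PySem.Dict.insert result p.2 2
        else PySem.Dict.insert result p.2 3)
      PySem.Dict.empty).items

-- ===== PORT B =====
def assign_blocks_to_matches_alt (match_ids : List String) : List (String × Int) :=
  if match_ids = [] then []
  else
    let sorted_ids := PySem.List.sorted match_ids (fun x => x) false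
    ((PySem.List.pyRange 0 (PySem.List.len sorted_ids) 10).foldl
      (fun (result : PySem.Dict String Int) (start : Int) =>
        let b := PySem.Int.mod (PySem.Int.floordiv start 10) 3 + 1
        (PySem.List.slice sorted_ids (some start) (some (start + 10))).foldl
          (fun r mid => PySem.Dict.insert r mid b) result)
      PySem.Dict.empty).items

-- ===== PRECONDITION & SPEC =====
def Spec_assign_blocks_to_matches (match_ids : List String) (out : List (String × Int)) : Prop := out = assign_blocks_to_matches_alt match_ids
instance (match_ids : List String) (out : List (String × Int)) : Decidable (Spec_assign_blocks_to_matches match_ids out) := by unfold Spec_assign_blocks_to_matches; infer_instance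

-- ===== CLAIM (what is proved, stated in full; the proofs are below) =====
def Claim_equal_assign_blocks_to_matches : Prop := ∀ (match_ids : List String), Dom_assign_blocks_to_matches match_ids → Spec_assign_blocks_to_matches match_ids (assign_blocks_to_matches match_ids)

-- ===== LEMMAS AND PROOFS =====

-- A's loop body (as a function of the enumerated pair).
def pvBodyA (result : PySem.Dict String Int) (p : Int × String) : PySem.Dict String Int :=
  let position_in_cycle := PySem.Int.mod p.1 30
  if position_in_cycle < 10 then PySem.Dict.insert result p.2 1
  else if position_in_cycle < 20 then PySem.Dict.insert result p.2 2
  else PySem.Dict.insert result p.2 3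

-- The block A assigns at index i.
def pvBlockA (i : Int) : Int :=
  if PySem.Int.mod i 30 < 10 then 1 else if PySem.Int.mod i 30 < 20 then 2 else 3

lemma pvBodyA_eq (result : PySem.Dict String Int) (p : Int × String) :
    pvBodyA result p = PySem.Dict.insert result p.2 (pvBlockA p.1) := by
  simp only [pvBodyA, pvBlockA]
  split_ifs <;> rfl

-- step-10 range unrolling
lemma pvRange10_nil (a b : Int) (h : b ≤ a) : PySem.List.pyRange a b 10 = [] := by
  rw [PySem.List.pyRange_of_pos a b (by norm_num)]
  simp [show ¬ a < b by omega]

lemma pvRange10_cons (a b : Int) (h : a < b) :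
    PySem.List.pyRange a b 10 = a :: PySem.List.pyRange (a + 10) b 10 := by
  rw [PySem.List.pyRange_of_pos a b (by norm_num),
      PySem.List.pyRange_of_pos (a + 10) b (by norm_num)]
  by_cases h2 : a + 10 < b
  · have hn : ((b - a + 10 - 1) / 10).toNat = ((b - (a + 10) + 10 - 1) / 10).toNat + 1 := by
      omega
    simp only [if_pos h, if_pos h2, hn, List.range_succ_eq_map, List.map_cons, List.map_map,
      Nat.cast_zero, mul_zero, add_zero, List.cons.injEq, true_and]
    apply List.map_congr_left
    intro j _
    simp only [Function.comp_apply, Nat.cast_succ]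
    ring
  · have hn : ((b - a + 10 - 1) / 10).toNat = 1 := by omega
    simp [if_pos h, if_neg h2, hn, List.range_succ]

-- A's fold over an enumerated list all of whose indices get the same block v
lemma pvFoldA_const (u : List String) : ∀ (s : Int) (d : PySem.Dict String Int) (v : Int),
    (∀ i : Int, s ≤ i → i < s + u.length → pvBlockA i = v) →
    (PySem.List.enumerate u s).foldl pvBodyA d
      = u.foldl (fun r mid => PySem.Dict.insert r mid v) d := by
  induction u with
  | nil => intro s d v _; simp [PySem.List.enumerate_nil]
  | cons x xs ih =>
    intro s d v hv
    rw [PySem.List.enumerate_cons, List.foldl_cons, List.foldl_cons, pvBodyA_eq]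
    have hx : pvBlockA s = v := hv s le_rfl (by simp; try omega)
    rw [hx]
    exact ih (s + 1) _ v (fun i h1 h2 => hv i (by omega) (by simp at h2 ⊢; omega))

-- arithmetic: every index in the chunk [10*k, 10*k + m), m ≤ 10, gets block (10*k // 10) % 3 + 1
lemma pvBlock_chunk (k : Nat) (i : Int) (m : Nat) (hm : m ≤ 10)
    (h1 : 10 * (k : Int) ≤ i) (h2 : i < 10 * (k : Int) + m) :
    pvBlockA i = PySem.Int.mod (PySem.Int.floordiv (10 * (k : Int)) 10) 3 + 1 := by
  unfold pvBlockA
  rw [PySem.Int.mod_eq_emod_of_pos (by norm_num : (0:Int) < 30),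
      PySem.Int.mod_eq_emod_of_pos (by norm_num : (0:Int) < 3),
      PySem.Int.floordiv_eq_ediv_of_pos (by norm_num : (0:Int) < 10)]
  split_ifs <;> omega

-- main invariant: B's remaining chunked fold equals A's fold over the remaining suffix
lemma pvMain (full : List String) : ∀ (n : Nat) (t : List String) (k : Nat)
    (d : PySem.Dict String Int), t.length = n → List.drop (10 * k) full = t →
    full.length = 10 * k + t.length →
    (PySem.List.pyRange (10 * (k : Int)) (full.length : Int) 10).foldl
      (fun (result : PySem.Dict String Int) (start : Int) =>
        let b := PySem.Int.mod (PySem.Int.floordiv start 10) 3 + 1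
        (PySem.List.slice full (some start) (some (start + 10))).foldl
          (fun r mid => PySem.Dict.insert r mid b) result) d
    = (PySem.List.enumerate t (10 * (k : Int))).foldl pvBodyA d := by
  intro n
  induction n using Nat.strong_induction_on with
  | _ n ih =>
    intro t k d hn hdrop hlen
    by_cases ht : t = []
    · subst ht
      simp at hlen
      have : ((full.length : Int)) ≤ 10 * (k : Int) := by omega
      rw [pvRange10_nil _ _ this]
      simp [PySem.List.enumerate_nil]
    · have htl : 0 < t.length := List.length_pos_of_ne_nil ht
      have hlt : 10 * (k : Int) < (full.length : Int) := by
        push_cast [hlen]; omega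
      rw [pvRange10_cons _ _ hlt, List.foldl_cons]
      -- the sliced chunk is t.take 10
      have hslice : PySem.List.slice full (some (10 * (k : Int))) (some (10 * (k : Int) + 10))
          = t.take 10 := by
        have h1 : (10 * (k : Int)) = ((10 * k : Nat) : Int) := by push_cast; ring
        have h2 : (10 * (k : Int) + 10) = ((10 * k + 10 : Nat) : Int) := by push_cast; ring
        rw [h2, h1, PySem.List.slice_natCast, hdrop]
        congr 1
        omega
      rw [hslice]
      -- split t into its first chunk and the rest
      conv_rhs => rw [← List.take_append_drop 10 t]
      rw [PySem.List.enumerate_append, List.foldl_append]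
      rw [pvFoldA_const (t.take 10) (10 * (k : Int)) d _
        (fun i hi1 hi2 => pvBlock_chunk k i (t.take 10).length (by simp) hi1 hi2)]
      by_cases h10 : t.length ≤ 10
      · have hdrop10 : t.drop 10 = [] := by
          apply List.drop_eq_nil_of_le; omega
        have hr : ((full.length : Int)) ≤ 10 * (k : Int) + 10 := by push_cast [hlen]; omega
        rw [hdrop10, pvRange10_nil _ _ hr]
        simp [PySem.List.enumerate_nil]
      · have htake : (t.take 10).length = 10 := by simp; omega
        have hstep : 10 * (k : Int) + 10 = 10 * ((k + 1 : Nat) : Int) := by push_cast; ring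
        have hs2 : 10 * (k : Int) + ((t.take 10).length : Int) = 10 * ((k + 1 : Nat) : Int) := by
          rw [htake]; push_cast; ring
        rw [hstep, hs2]
        exact ih (t.length - 10) (by omega) (t.drop 10) (k + 1) _ (by simp)
          (by rw [← hdrop, List.drop_drop]; congr 1; try omega)
          (by simp only [List.length_drop, hlen]; omega)

-- ===== VERDICT (by name: the statement is the Claim_ definition above) =====
theorem assign_blocks_to_matches_spec : Claim_equal_assign_blocks_to_matches := by
  intro match_ids _
  unfold Spec_assign_blocks_to_matches assign_blocks_to_matches assign_blocks_to_matches_alt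
  by_cases h : match_ids = []
  · simp [h]
  · simp only [if_neg h]
    have := pvMain (PySem.List.sorted match_ids (fun x => x) false)
      (PySem.List.sorted match_ids (fun x => x) false).length
      (PySem.List.sorted match_ids (fun x => x) false) 0 PySem.Dict.empty rfl (by simp) (by simp)
    simp only [Nat.cast_zero, mul_zero] at this
    rw [show (PySem.List.len (PySem.List.sorted match_ids (fun x => x) false))
        = ((PySem.List.sorted match_ids (fun x => x) false).length : Int) from by
      simp [PySem.List.len_eq]]
    rw [this]
    rfl
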